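-- pv_equiv track=rewrite | github.com/Aritra-Roy-Mazumder/Huffman_compression | huffman_coding.py | get_sorted_list_of_conjugate_chars
-- ===== SOURCE A (Python) =====
-- def get_sorted_list_of_conjugate_chars(freq, dictionary):
--     value_lst = []
--     for i in freq:
--         for j in dictionary.keys():
--             if dictionary[j] == i:
--                 value_lst.append(j)
--                 del dictionary[j]
--                 break
--     return value_lst
-- ===== SOURCE B (Python) =====
-- def get_sorted_list_of_conjugate_chars(freq, dictionary):
--     # One-pass reverse map value -> bucket of keys (insertion order), buckets
--     # reversed once so pop() serves them FIFO; then one pass over freq.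
--     rev = {}
--     for k, v in dictionary.items():
--         rev.setdefault(v, []).append(k)
--     for q in rev.values():
--         q.reverse()
--     out = []
--     for i in freq:
--         q = rev.get(i)
--         if q:
--             out.append(q.pop())
--     return out
-- ===== Notes on version B (the rewrite author's own statement) =====
-- stated objective: faster
-- what changed: Replaces A's per-frequency linear scan over the dict keys by a reverse map value->FIFO bucket of keys built in one pass, then one O(1)-amortized pop per frequency; A mutates the dictionary in place, B does not (return value is what is compared).
import Mathlib
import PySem

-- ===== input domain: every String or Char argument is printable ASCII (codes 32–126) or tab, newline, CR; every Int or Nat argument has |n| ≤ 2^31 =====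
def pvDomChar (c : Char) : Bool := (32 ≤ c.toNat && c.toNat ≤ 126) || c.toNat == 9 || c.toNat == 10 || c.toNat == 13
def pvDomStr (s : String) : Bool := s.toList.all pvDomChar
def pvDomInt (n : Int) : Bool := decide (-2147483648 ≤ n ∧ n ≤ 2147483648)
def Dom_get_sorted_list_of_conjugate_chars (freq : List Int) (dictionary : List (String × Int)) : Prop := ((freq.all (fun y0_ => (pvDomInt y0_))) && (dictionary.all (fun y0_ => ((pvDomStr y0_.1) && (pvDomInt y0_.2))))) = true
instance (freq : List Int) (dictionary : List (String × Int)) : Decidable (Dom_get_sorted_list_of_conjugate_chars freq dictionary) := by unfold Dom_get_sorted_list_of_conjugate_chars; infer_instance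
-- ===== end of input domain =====

-- B replaces A's per-frequency scan of the dict keys by a precomputed value->FIFO-bucket
-- reverse map (O(n+m) vs O(n*m)); A also deletes matched keys from `dictionary` in place,
-- B does not mutate it — the equivalence proved here is about the return value.

-- ===== PORT A =====
-- inner loop: for j in dictionary.keys(): if dictionary[j] == i: <found j>; break
def pvFindA (ks : List String) (d : PySem.Dict String Int) (i : Int) : Option String :=
  match ks with
  | [] => none
  | j :: rest => if d.get? j = some i then some j else pvFindA rest d i

def get_sorted_list_of_conjugate_chars (freq : List Int) (dictionary : List (String × Int)) : List String :=
  (freq.foldl (fun st i =>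
      match pvFindA st.1.keys st.1 i with
      | some j => (st.1.erase j, st.2 ++ [j])
      | none => st)
    (PySem.Dict.mk dictionary, ([] : List String))).2

-- ===== PORT B =====
-- rev = {}; for k, v in dictionary.items(): rev.setdefault(v, []).append(k)
def pvBuildRev (dictionary : List (String × Int)) : PySem.Dict Int (List String) :=
  dictionary.foldl (fun m p => m.modify p.2 [] (fun q => q ++ [p.1])) PySem.Dict.empty

-- for q in rev.values(): q.reverse()
def pvRevBuckets (m : PySem.Dict Int (List String)) : PySem.Dict Int (List String) :=
  PySem.Dict.mk (m.items.map (fun p => (p.1, p.2.reverse)))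

def get_sorted_list_of_conjugate_chars_alt (freq : List Int) (dictionary : List (String × Int)) : List String :=
  let rev := pvRevBuckets (pvBuildRev dictionary)
  (freq.foldl (fun st i =>
      match PySem.List.pop? (st.1.getD i []) (-1) with
      | some (x, q') => (st.1.insert i q', st.2 ++ [x])
      | none => st)
    (rev, ([] : List String))).2

-- ===== PRECONDITION & SPEC =====
-- Pre_ only rules out association lists with a repeated key, which represent no Python
-- dict (a dict cannot carry duplicate keys), so no input the Python A accepts is excluded.
def Pre_get_sorted_list_of_conjugate_chars (freq : List Int) (dictionary : List (String × Int)) : Prop :=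
  (dictionary.map Prod.fst).Nodup
instance (freq : List Int) (dictionary : List (String × Int)) : Decidable (Pre_get_sorted_list_of_conjugate_chars freq dictionary) := by unfold Pre_get_sorted_list_of_conjugate_chars; infer_instance

def pvWitness_get_sorted_list_of_conjugate_chars : List Int × (List (String × Int)) :=
  ([2, 1, 2], [("a", 2), ("b", 1), ("c", 2)])

def Spec_get_sorted_list_of_conjugate_chars (freq : List Int) (dictionary : List (String × Int)) (out : List String) : Prop := out = get_sorted_list_of_conjugate_chars_alt freq dictionary
instance (freq : List Int) (dictionary : List (String × Int)) (out : List String) : Decidable (Spec_get_sorted_list_of_conjugate_chars freq dictionary out) := by unfold Spec_get_sorted_list_of_conjugate_chars; infer_instance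

-- ===== CLAIM (what is proved, stated in full; the proofs are below) =====
def Claim_equal_get_sorted_list_of_conjugate_chars : Prop := ∀ (freq : List Int) (dictionary : List (String × Int)), Dom_get_sorted_list_of_conjugate_chars freq dictionary → Pre_get_sorted_list_of_conjugate_chars freq dictionary → Spec_get_sorted_list_of_conjugate_chars freq dictionary (get_sorted_list_of_conjugate_chars freq dictionary)

-- ===== LEMMAS AND PROOFS =====

-- keys of d carrying value v, in order
def pvKeysOf (v : Int) (d : List (String × Int)) : List String :=
  (d.filter (fun p => p.2 == v)).map Prod.fst

lemma pvKeysOf_cons (v : Int) (a : String × Int) (t : List (String × Int)) :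
    pvKeysOf v (a :: t) = if a.2 == v then a.1 :: pvKeysOf v t else pvKeysOf v t := by
  simp only [pvKeysOf, List.filter_cons]
  split_ifs <;> simp

lemma pvBuild_getD (d : List (String × Int)) (m : PySem.Dict Int (List String)) (v : Int) :
    (d.foldl (fun m p => m.modify p.2 [] (fun q => q ++ [p.1])) m).getD v []
      = m.getD v [] ++ pvKeysOf v d := by
  induction d generalizing m with
  | nil => simp [pvKeysOf]
  | cons a t ih =>
    simp only [List.foldl_cons]
    rw [ih, PySem.Dict.getD_modify, pvKeysOf_cons]
    by_cases hv : v = a.2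
    · subst hv; simp
    · have : (a.2 == v) = false := by simp [Ne.symm hv]
      simp [this, hv]

lemma pvRevBuckets_getD (l : List (Int × List String)) (v : Int) :
    (pvRevBuckets (PySem.Dict.mk l)).getD v [] = ((PySem.Dict.mk l).getD v []).reverse := by
  simp only [pvRevBuckets, PySem.Dict.getD_eq_get?_getD, PySem.Dict.get?, List.find?_map]
  cases h : List.find? (fun p => p.1 == v) l with
  | none => simp [Function.comp_def, h]
  | some p => simp [Function.comp_def, h]

lemma pvFindA_congr (ks : List String) (d d' : PySem.Dict String Int) (i : Int)
    (h : ∀ j ∈ ks, d.get? j = d'.get? j) : pvFindA ks d i = pvFindA ks d' i := by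
  induction ks with
  | nil => rfl
  | cons j rest ih =>
    simp only [pvFindA, h j (by simp)]
    rw [ih (fun x hx => h x (by simp [hx]))]

lemma pvStepChar (d : List (String × Int)) (i : Int) (h : (d.map Prod.fst).Nodup) :
    pvFindA (d.map Prod.fst) (PySem.Dict.mk d) i = (pvKeysOf i d).head?
    ∧ ∀ k rest, pvKeysOf i d = k :: rest →
        ∀ v, pvKeysOf v (d.filter (fun q => !(q.1 == k))) = if v = i then rest else pvKeysOf v d := by
  induction d with
  | nil => exact ⟨rfl, by intro k rest hk; cases hk⟩
  | cons a t ih =>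
    rw [List.map_cons, List.nodup_cons] at h
    obtain ⟨ha, hnd⟩ := h
    have ihh := ih hnd
    have hget : (PySem.Dict.mk (a :: t)).get? a.1 = some a.2 := by
      rcases a with ⟨k0, v0⟩
      simp [PySem.Dict.get?_mk_cons]
    by_cases hb : a.2 = i
    · have hkOf : pvKeysOf i (a :: t) = a.1 :: pvKeysOf i t := by
        rw [pvKeysOf_cons, if_pos (by simp [hb])]
      constructor
      · rcases a with ⟨k0, v0⟩
        simp only [List.map_cons, pvFindA, hget, hkOf, List.head?_cons]
        rw [if_pos (show some v0 = some i from by rw [show v0 = i from hb])]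
      · intro k rest hk v
        rw [hkOf] at hk
        injection hk with h1 h2
        subst h1; subst h2
        have hfa : List.filter (fun q => !(q.1 == a.1)) (a :: t) = t := by
          rw [List.filter_cons, if_neg (by simp)]
          refine List.filter_eq_self.mpr ?_
          intro q hq
          simp only [Bool.not_eq_eq_eq_not, Bool.not_true, beq_eq_false_iff_ne, ne_eq]
          intro he; exact ha (he ▸ List.mem_map_of_mem hq)
        rw [hfa]
        by_cases hv : v = i
        · simp [hv]
        · rw [if_neg hv, pvKeysOf_cons, if_neg (by simp only [hb, beq_iff_eq]; exact fun he => hv he.symm)]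
    · have hbne : (a.2 == i) = false := by simp [hb]
      have hkOf : pvKeysOf i (a :: t) = pvKeysOf i t := by rw [pvKeysOf_cons, if_neg (by simp [hb])]
      have hfind : pvFindA ((a :: t).map Prod.fst) (PySem.Dict.mk (a :: t)) i
          = pvFindA (t.map Prod.fst) (PySem.Dict.mk t) i := by
        simp only [List.map_cons, pvFindA, hget]
        rw [if_neg (by simp [hb])]
        apply pvFindA_congr
        intro j hj
        rcases a with ⟨k0, v0⟩
        rw [PySem.Dict.get?_mk_cons, if_neg (by simp; intro he; exact ha (he ▸ hj))]
      constructor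
      · rw [hfind, hkOf, ihh.1]
      · intro k rest hk v
        rw [hkOf] at hk
        have hkt := ihh.2 k rest hk
        have hkmem : k ∈ t.map Prod.fst := by
          have hm : k ∈ pvKeysOf i t := by rw [hk]; exact List.mem_cons_self ..
          simp only [pvKeysOf, List.mem_map] at hm
          obtain ⟨q, hq, rfl⟩ := hm
          exact List.mem_map_of_mem (List.mem_of_mem_filter hq)
        have hak : (a.1 == k) = false := by
          simp only [beq_eq_false_iff_ne, ne_eq]
          intro he; exact ha (he ▸ hkmem)
        rw [List.filter_cons, if_pos (by simp [hak]), pvKeysOf_cons]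
        by_cases hv : v = i
        · rw [if_neg (by rw [hv]; simp [hbne]), hkt v, if_pos hv, if_pos hv]
        · rw [if_neg hv, pvKeysOf_cons]
          rw [hkt v, if_neg hv]

lemma pvLoopEq (freq : List Int) (d : List (String × Int)) (m : PySem.Dict Int (List String))
    (acc : List String) (hnd : (d.map Prod.fst).Nodup)
    (hinv : ∀ v, m.getD v [] = (pvKeysOf v d).reverse) :
    (freq.foldl (fun st i =>
        match pvFindA st.1.keys st.1 i with
        | some j => (st.1.erase j, st.2 ++ [j])
        | none => st)
      (PySem.Dict.mk d, acc)).2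
    = (freq.foldl (fun st i =>
        match PySem.List.pop? (st.1.getD i []) (-1) with
        | some (x, q') => (st.1.insert i q', st.2 ++ [x])
        | none => st)
      (m, acc)).2 := by
  induction freq generalizing d m acc with
  | nil => rfl
  | cons i fr ih =>
    have hchar := pvStepChar d i hnd
    have hkeys : (PySem.Dict.mk d).keys = d.map Prod.fst := rfl
    simp only [List.foldl_cons, hkeys, hchar.1, hinv i]
    cases hK : pvKeysOf i d with
    | nil =>
      have hpop : PySem.List.pop? (([] : List String).reverse) (-1) = none := by
        simp [PySem.List.pop?, PySem.List.pyIdx?]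
      simp only [List.head?_nil, hpop]
      exact ih d m acc hnd hinv
    | cons k rest =>
      have hpop : PySem.List.pop? ((k :: rest).reverse) (-1) = some (k, rest.reverse) := by
        simpa using PySem.List.pop?_last rest.reverse k
      simp only [List.head?_cons, hpop]
      have herase : (PySem.Dict.mk d).erase k = PySem.Dict.mk (d.filter (fun q => !(q.1 == k))) := rfl
      rw [herase]
      apply ih
      · exact (List.filter_sublist.map Prod.fst).nodup hnd
      · intro v
        rw [PySem.Dict.getD_insert, hchar.2 k rest hK v]
        by_cases hv : v = i
        · simp [hv]
        · simp [hv, hinv v]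

-- ===== VERDICT (by name: the statement is the Claim_ definition above) =====
theorem get_sorted_list_of_conjugate_chars_spec : Claim_equal_get_sorted_list_of_conjugate_chars := by
  intro freq dictionary _ hpre
  unfold Spec_get_sorted_list_of_conjugate_chars
  simp only [get_sorted_list_of_conjugate_chars, get_sorted_list_of_conjugate_chars_alt]
  refine (pvLoopEq freq dictionary (pvRevBuckets (pvBuildRev dictionary)) [] hpre ?_)
  intro v
  have h2 := pvRevBuckets_getD (pvBuildRev dictionary).items v
  have h1 := pvBuild_getD dictionary PySem.Dict.empty v
  rw [show PySem.Dict.mk (pvBuildRev dictionary).items = pvBuildRev dictionary from rfl] at h2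
  rw [h2, show pvBuildRev dictionary = dictionary.foldl (fun m p => m.modify p.2 [] (fun q => q ++ [p.1])) PySem.Dict.empty from rfl, h1, PySem.Dict.getD_empty, List.nil_append]
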